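-- pv_equiv track=rewrite | github.com/ShodmonovZafar/qudrat_abdurahimov | tanlangan_masalalar_80/masala_45.py | f45
-- ===== SOURCE A (Python) =====
-- def f45(M):
--     kesuvchi = len(M)
--     rel = []
--     for i in range(len(M)):
--         A = []
--         for j in range(len(M)):
--
--             if j < kesuvchi:
--                 A.append(M[i][j])
--             else:
--                 break
--         rel.append(A)
--
--         kesuvchi -= 1
--     kesuvchi = 0
--     for i in range(len(M) - 1, 0, -1):
--
--         for j in range(len(M)):
--             if kesuvchi < j:
--                 rel[(len(M) - 1) - i].append(M[j][i])
--         kesuvchi += 1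
--     return rel
-- ===== SOURCE B (Python) =====
-- def f45(M):
--     def hook_rows(S):
--         m = len(S)
--         if m == 0:
--             return []
--         head = [S[0][j] for j in range(m)] + [S[i][m - 1] for i in range(1, m)]
--         sub = [[S[i][j] for j in range(m - 1)] for i in range(1, m)]
--         return [head] + hook_rows(sub)
--     return hook_rows(M)
-- ===== Notes on version B (the rewrite author's own statement) =====
-- stated objective: alternative
-- what changed: B is a recursive peeling algorithm: it strips the top 'hook' (first row plus last column) off the square, materialises the remaining (m-1)x(m-1) submatrix, and recurses on it, instead of A's two iterative index sweeps mutating a shared rel list.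
import Mathlib
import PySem

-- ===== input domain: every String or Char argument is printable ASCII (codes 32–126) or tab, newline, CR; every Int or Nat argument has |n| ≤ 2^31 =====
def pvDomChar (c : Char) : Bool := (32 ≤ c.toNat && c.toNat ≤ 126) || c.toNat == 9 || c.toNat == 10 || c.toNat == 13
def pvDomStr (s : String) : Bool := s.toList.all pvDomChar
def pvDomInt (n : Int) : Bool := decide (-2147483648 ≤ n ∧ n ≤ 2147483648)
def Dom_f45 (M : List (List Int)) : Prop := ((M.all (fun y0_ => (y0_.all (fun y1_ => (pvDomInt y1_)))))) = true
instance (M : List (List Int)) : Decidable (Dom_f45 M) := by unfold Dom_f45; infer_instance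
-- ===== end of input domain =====

-- B replaces A's two iterative index sweeps with recursive peeling: strip the top hook (first
-- row + last column) and recurse on the explicitly built (m-1)x(m-1) submatrix (not faster:
-- building the submatrices copies O(n^3) cells).
-- ===== PORT A =====
-- M[i][j] for Nat indices; Pre_ keeps every access in range, where Python indexing agrees with getD
def pvGetA (M : List (List Int)) (i j : Nat) : Int := (M.getD i []).getD j 0

-- inner 'for j in range(n): if j < kesuvchi: A.append(M[i][j]) else: break' (fuel = remaining range length)
def pvInnerA (M : List (List Int)) (i : Nat) (kes : Int) : Nat → Nat → List Int
  | 0, _ => []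
  | fuel+1, j => if (j : Int) < kes then pvGetA M i j :: pvInnerA M i kes fuel (j+1) else []

def f45 (M : List (List Int)) : List (List Int) :=
  let n := M.length
  -- first sweep: state (rel, kesuvchi)
  let p1 := (List.range n).foldl
      (fun (st : List (List Int) × Int) i => (st.1 ++ [pvInnerA M i st.2 n 0], st.2 - 1))
      ([], (n : Int))
  -- second sweep: for i in range(n-1, 0, -1), state (rel, kesuvchi)
  let p2 := (PySem.List.pyRange ((n : Int) - 1) 0 (-1)).foldl
      (fun (st : List (List Int) × Int) i =>
        ((List.range n).foldl
            (fun rel (j : Nat) =>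
              if st.2 < (j : Int) then
                rel.modify (((n : Int) - 1 - i).toNat) (· ++ [pvGetA M j i.toNat])
              else rel)
            st.1,
         st.2 + 1))
      (p1.1, 0)
  p2.1

-- ===== PORT B =====
-- S[i][j] for Nat indices; inside Pre_ every access Source B makes is in range, where it agrees with getD
def pvGetB (S : List (List Int)) (i j : Nat) : Int := (S.getD i []).getD j 0

-- hook_rows from Source B; the fuel argument (= len(S), shrinking by one per peel) only makes the
-- recursion structural, the m = 0 test is Source B's own base case
def pvHooks : Nat → List (List Int) → List (List Int)
  | 0, _ => []
  | fuel+1, S =>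
    let m := S.length
    if m = 0 then [] else
      ((List.range m).map (fun j => pvGetB S 0 j)
        ++ (List.range' 1 (m - 1)).map (fun i => pvGetB S i (m - 1)))
      :: pvHooks fuel
          ((List.range' 1 (m - 1)).map (fun i => (List.range (m - 1)).map (fun j => pvGetB S i j)))

def f45_alt (M : List (List Int)) : List (List Int) := pvHooks M.length M

-- ===== PRECONDITION & SPEC =====
-- Pre_ excludes exactly the ragged inputs (some row shorter than len(M)) on which Python A raises IndexError (so does B).
def Pre_f45 (M : List (List Int)) : Prop := ∀ row ∈ M, M.length ≤ row.length
instance (M : List (List Int)) : Decidable (Pre_f45 M) := by unfold Pre_f45; infer_instance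
def pvWitness_f45 : List (List Int) := [[1, 2, 3], [4, 5, 6], [7, 8, 9]]

def Spec_f45 (M : List (List Int)) (out : List (List Int)) : Prop := out = f45_alt M
instance (M : List (List Int)) (out : List (List Int)) : Decidable (Spec_f45 M out) := by unfold Spec_f45; infer_instance

-- ===== CLAIM (what is proved, stated in full; the proofs are below) =====
def Claim_equal_f45 : Prop := ∀ (M : List (List Int)), Dom_f45 M → Pre_f45 M → Spec_f45 M (f45 M)

-- ===== LEMMAS AND PROOFS =====

-- the prefix of row r and the column tail of row r, shared shorthand for the proofs
def pvPref (M : List (List Int)) (r : Nat) : List Int :=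
  (List.range (M.length - r)).map (fun j => pvGetA M r j)
def pvCol (M : List (List Int)) (r : Nat) : List Int :=
  (List.range' (r + 1) (M.length - (r + 1))).map (fun j => pvGetA M j (M.length - 1 - r))

-- the break loop returns the first (min fuel (K - j)) elements starting at j
theorem pvInnerA_eq (M : List (List Int)) (i : Nat) (K : Nat) :
    ∀ (fuel j : Nat), pvInnerA M i (K : Int) fuel j
      = (List.range' j (min fuel (K - j))).map (pvGetA M i) := by
  intro fuel
  induction fuel with
  | zero => intro j; simp [pvInnerA]
  | succ f ih =>
    intro j
    simp only [pvInnerA]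
    by_cases h : j < K
    · rw [if_pos (by exact_mod_cast h)]
      rw [ih (j+1)]
      have h1 : min (f+1) (K - j) = (min f (K - (j+1))) + 1 := by omega
      rw [h1, List.range'_succ, List.map_cons]
    · rw [if_neg (by exact_mod_cast h)]
      have : K - j = 0 := by omega
      simp [this]

-- pass 1 invariant
theorem pass1_inv (M : List (List Int)) :
    ∀ (k : Nat), k ≤ M.length →
      (List.range k).foldl
        (fun (st : List (List Int) × Int) i => (st.1 ++ [pvInnerA M i st.2 M.length 0], st.2 - 1))
        ([], (M.length : Int))
      = ((List.range k).map (pvPref M), (M.length : Int) - k) := by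
  intro k
  induction k with
  | zero => intro _; simp
  | succ k ih =>
    intro hk
    rw [List.range_succ, List.foldl_append, ih (by omega), List.foldl_cons, List.foldl_nil,
        List.map_append]
    have hc : ((M.length : Int) - k) = ((M.length - k : Nat) : Int) := by omega
    rw [hc, pvInnerA_eq M k (M.length - k) M.length 0]
    have h1 : min M.length (M.length - k - 0) = M.length - k := by omega
    rw [h1]
    simp only [Prod.mk.injEq]
    refine ⟨?_, ?_⟩
    · simp [pvPref, List.range_eq_range']
    · omega

theorem modify_modify {α : Type} (l : List α) (r : Nat) (f g : α → α) :
    (l.modify r f).modify r g = l.modify r (fun x => g (f x)) := by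
  apply List.ext_getElem
  · simp
  · intro k h1 h2
    simp only [List.getElem_modify]
    by_cases h : r = k <;> simp [h]

-- a fold of conditional appends at one fixed index is one modify with the filtered batch
theorem fold_modify_batch (M : List (List Int)) (r : Nat) (i : Nat) (p : Nat → Prop)
    [DecidablePred p] :
    ∀ (js : List Nat) (rel : List (List Int)),
      js.foldl (fun rel j => if p j then rel.modify r (· ++ [pvGetA M j i]) else rel) rel
        = rel.modify r (· ++ (js.filter (fun j => decide (p j))).map (fun j => pvGetA M j i)) := by
  intro js
  induction js with
  | nil =>
    intro rel
    have hid : (fun x : List Int => x ++ ([] : List Int)) = id := by funext x; simp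
    simp only [List.foldl_nil, List.filter_nil, List.map_nil, hid, List.modify_id]
  | cons a t ih =>
    intro rel
    simp only [List.foldl_cons, List.filter_cons]
    by_cases h : p a
    · rw [if_pos h, ih, modify_modify]
      have hd : decide (p a) = true := by simpa using h
      rw [hd]
      congr 1
      funext x
      simp
    · rw [if_neg h, ih]
      have hd : decide (p a) = false := by simpa using h
      rw [hd]
      simp

theorem filter_range_gt (r : Nat) : ∀ (n : Nat),
    (List.range n).filter (fun j => decide ((r : Int) < (j : Nat)))
      = List.range' (r + 1) (n - (r + 1)) := by
  intro n
  induction n with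
  | zero => simp
  | succ m ih =>
    rw [List.range_succ, List.filter_append, ih]
    by_cases h : r < m
    · have hd : decide ((r : Int) < (m : Nat)) = true := by
        simp only [decide_eq_true_eq]
        exact_mod_cast h
      have h1 : m + 1 - (r + 1) = (m - (r + 1)) + 1 := by omega
      simp only [List.filter_cons, hd, if_pos, List.filter_nil, h1, List.range'_1_concat]
      have hm : r + 1 + (m - (r + 1)) = m := by omega
      rw [hm]
    · have hd : decide ((r : Int) < (m : Nat)) = false := by
        simp only [decide_eq_false_iff_not, not_lt]
        exact_mod_cast Nat.le_of_not_lt h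
      have h1 : m + 1 - (r + 1) = m - (r + 1) := by omega
      simp only [List.filter_cons, hd, Bool.false_eq_true, if_false, List.filter_nil,
        List.append_nil, h1]

theorem modify_map_range {α : Type} (n r : Nat) (g : Nat → α) (f : α → α) (_hr : r < n) :
    ((List.range n).map g).modify r f
      = (List.range n).map (fun x => if x = r then f (g x) else g x) := by
  apply List.ext_getElem
  · simp
  · intro k h1 h2
    rw [List.getElem_modify]
    simp only [List.length_modify, List.length_map, List.length_range] at h1
    simp only [List.getElem_map, List.getElem_range]
    by_cases h : r = k
    · simp [h]
    · rw [if_neg h, if_neg (by omega)]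

-- pass 2 invariant
theorem pass2_inv (M : List (List Int)) :
    ∀ (k : Nat), k ≤ M.length - 1 →
      List.foldl
          (fun (st : List (List Int) × Int) i =>
            ((List.range M.length).foldl
                (fun rel (j : Nat) =>
                  if st.2 < (j : Int) then
                    rel.modify (((M.length : Int) - 1 - i).toNat) (· ++ [pvGetA M j i.toNat])
                  else rel)
                st.1,
             st.2 + 1))
          ((List.range M.length).map (pvPref M), 0)
          (((List.range (M.length - 1)).map (fun r => ((M.length : Int) - 1 - (r : Nat)))).take k)
      = ((List.range M.length).map
          (fun x => if x < k then pvPref M x ++ pvCol M x else pvPref M x), (k : Int)) := by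
  intro k
  induction k with
  | zero =>
    intro _
    simp only [List.take_zero, List.foldl_nil, Nat.cast_zero, Prod.mk.injEq]
    refine ⟨?_, trivial⟩
    apply List.map_congr_left
    intro x _
    simp
  | succ k ih =>
    intro hk
    have hk' : k < M.length - 1 := by omega
    have hlen : k < ((List.range (M.length - 1)).map
        (fun r => ((M.length : Int) - 1 - (r : Nat)))).length := by
      simpa using hk'
    rw [List.take_add_one, List.getElem?_eq_getElem hlen, Option.toList_some, List.foldl_append,
        ih (by omega), List.foldl_cons, List.foldl_nil]
    simp only [List.getElem_map, List.getElem_range]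
    have hidx : (((M.length : Int) - 1 - ((M.length : Int) - 1 - (k : Nat))).toNat) = k := by
      omega
    have hnat : ((((M.length : Int) - 1 - (k : Nat))).toNat) = M.length - 1 - k := by
      omega
    rw [hidx, hnat]
    rw [fold_modify_batch M k (M.length - 1 - k) (fun j => (k : Int) < (j : Nat))]
    rw [filter_range_gt k M.length]
    rw [modify_map_range M.length k _ _ (by omega)]
    simp only [Prod.mk.injEq]
    refine ⟨?_, by push_cast; ring⟩
    · apply List.map_congr_left
      intro x hx
      by_cases h1 : x = k
      · subst h1
        simp [pvCol]
      · by_cases h2 : x < k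
        · simp [h1, h2, show x < k + 1 by omega]
        · simp [h1, h2, show ¬ x < k + 1 by omega]

-- A's result, in closed form
theorem f45_eq_rows (M : List (List Int)) :
    f45 M = (List.range M.length).map (fun r => pvPref M r ++ pvCol M r) := by
  unfold f45
  simp only []
  rw [pass1_inv M M.length (le_refl _)]
  have hfst : (((List.range M.length).map (pvPref M), (M.length : Int) - M.length)).1
      = (List.range M.length).map (pvPref M) := rfl
  rw [hfst, PySem.List.pyRange_neg_one]
  have hmap : (List.range (((M.length : Int) - 1 - 0).toNat)).map
        (fun k => (M.length : Int) - 1 - (k : Nat))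
      = ((List.range (M.length - 1)).map
          (fun r => ((M.length : Int) - 1 - (r : Nat)))).take (M.length - 1) := by
    have hlen : (((M.length : Int) - 1 - 0).toNat) = M.length - 1 := by omega
    rw [hlen, List.take_of_length_le (by simp)]
  rw [hmap, pass2_inv M (M.length - 1) (le_refl _)]
  simp only []
  apply List.map_congr_left
  intro x hx
  rw [List.mem_range] at hx
  by_cases h : x < M.length - 1
  · simp [h]
  · have hx1 : x = M.length - 1 := by omega
    have hc : M.length - (x + 1) = 0 := by omega
    simp [h, pvCol, hc]

-- entries of the peeled submatrix are entries of S shifted by one row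
theorem pvGetB_peel (S : List (List Int)) (m : Nat) (i j : Nat)
    (hi : i < m - 1) (hj : j < m - 1) :
    pvGetB ((List.range' 1 (m - 1)).map
        (fun i => (List.range (m - 1)).map (fun j => pvGetB S i j))) i j
      = pvGetB S (i + 1) j := by
  have hs : (((List.range' 1 (m - 1)).map
      (fun i => (List.range (m - 1)).map (fun j => pvGetB S i j))).getD i [])
      = (List.range (m - 1)).map (fun j => pvGetB S (1 + i) j) := by
    rw [List.getD_eq_getElem _ _ (by simpa using hi)]
    simp
  have ht : ((List.range (m - 1)).map (fun j => pvGetB S (1 + i) j)).getD j 0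
      = pvGetB S (1 + i) j := by
    rw [List.getD_eq_getElem _ _ (by simpa using hj)]
    simp
  have hstep : pvGetB ((List.range' 1 (m - 1)).map
      (fun i => (List.range (m - 1)).map (fun j => pvGetB S i j))) i j
      = (((List.range' 1 (m - 1)).map
          (fun i => (List.range (m - 1)).map (fun j => pvGetB S i j))).getD i []).getD j 0 := rfl
  rw [hstep, hs, ht, Nat.add_comm 1 i]

-- Source B's hook_rows produces exactly the rows 'prefix ++ column tail'
theorem hooks_eq : ∀ (fuel : Nat) (S : List (List Int)), S.length = fuel →
    pvHooks fuel S = (List.range fuel).map (fun r => pvPref S r ++ pvCol S r) := by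
  intro fuel
  induction fuel with
  | zero => intro S h; simp [pvHooks]
  | succ f ih =>
    intro S h
    simp only [pvHooks, h, if_neg (by omega : ¬ f + 1 = 0)]
    set sub := (List.range' 1 (f + 1 - 1)).map
        (fun i => (List.range (f + 1 - 1)).map (fun j => pvGetB S i j)) with hsub
    have hsublen : sub.length = f := by simp [hsub]
    rw [ih sub hsublen]
    rw [show (List.range (f + 1)).map (fun r => pvPref S r ++ pvCol S r)
        = (pvPref S 0 ++ pvCol S 0)
          :: (List.range f).map (fun r => pvPref S (r + 1) ++ pvCol S (r + 1)) from by
      rw [List.range_succ_eq_map, List.map_cons, List.map_map]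
      rfl]
    congr 1
    · -- head row = pvPref S 0 ++ pvCol S 0
      have h1 : pvPref S 0 = (List.range (f + 1)).map (fun j => pvGetB S 0 j) := by
        simp [pvPref, pvGetA, pvGetB, h]
      have h2 : pvCol S 0 = (List.range' 1 (f + 1 - 1)).map (fun i => pvGetB S i (f + 1 - 1)) := by
        simp [pvCol, pvGetA, pvGetB, h]
      rw [h1, h2]
    · -- tail rows: row r of the submatrix = row r+1 of S
      apply List.map_congr_left
      intro r hr
      rw [List.mem_range] at hr
      have hpre : pvPref sub r = pvPref S (r + 1) := by
        unfold pvPref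
        rw [hsublen, h]
        have hl : f - r = f + 1 - (r + 1) := by omega
        rw [hl]
        apply List.map_congr_left
        intro j hj
        rw [List.mem_range] at hj
        exact pvGetB_peel S (f + 1) r j (by omega) (by omega)
      have hcol : pvCol sub r = pvCol S (r + 1) := by
        unfold pvCol
        rw [hsublen, h]
        apply List.ext_getElem
        · simp only [List.length_map, List.length_range']
          omega
        · intro k hk1 hk2
          simp only [List.getElem_map, List.getElem_range', Nat.one_mul]
          have hkl : k < f - (r + 1) := by
            simpa using hk1
          have he := pvGetB_peel S (f + 1) (r + 1 + k) (f - 1 - r) (by omega) (by omega)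
          have h3 : f + 1 - 1 - (r + 1) = f - 1 - r := by omega
          have h4 : r + 1 + 1 + k = r + 1 + k + 1 := by omega
          rw [h3, h4]
          exact he
      rw [hpre, hcol]

-- ===== VERDICT (by name: the statement is the Claim_ definition above) =====
theorem f45_spec : Claim_equal_f45 := by
  intro M _ _
  show f45 M = f45_alt M
  rw [f45_eq_rows, f45_alt, hooks_eq M.length M rfl]
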